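-- pv_equiv track=rewrite | github.com/jovalle/technis | src/tctl/sync.py | _owner_from_entries
-- ===== SOURCE A (Python) =====
-- def _owner_from_entries(entries: list[dict[str, str]]) -> tuple[str, str] | None:
--     for entry in entries:
--         if entry.get("rel") == "." and entry.get("uid") and entry.get("gid"):
--             return entry["uid"], entry["gid"]
--     for entry in entries:
--         if entry.get("uid") and entry.get("gid"):
--             return entry["uid"], entry["gid"]
--     return None
-- ===== SOURCE B (Python) =====
-- def _owner_from_entries(entries: list[dict[str, str]]) -> tuple[str, str] | None:
--     fallback = None
--     for entry in entries:
--         uid = entry.get("uid")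
--         gid = entry.get("gid")
--         if uid and gid:
--             if entry.get("rel") == ".":
--                 return uid, gid
--             if fallback is None:
--                 fallback = (uid, gid)
--     return fallback
-- ===== Notes on version B (the rewrite author's own statement) =====
-- stated objective: simpler
-- what changed: Replaces A's two sequential scans over the entry list with one single pass that returns a rel='.' match immediately and keeps the first valid entry as a fallback.
import Mathlib
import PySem

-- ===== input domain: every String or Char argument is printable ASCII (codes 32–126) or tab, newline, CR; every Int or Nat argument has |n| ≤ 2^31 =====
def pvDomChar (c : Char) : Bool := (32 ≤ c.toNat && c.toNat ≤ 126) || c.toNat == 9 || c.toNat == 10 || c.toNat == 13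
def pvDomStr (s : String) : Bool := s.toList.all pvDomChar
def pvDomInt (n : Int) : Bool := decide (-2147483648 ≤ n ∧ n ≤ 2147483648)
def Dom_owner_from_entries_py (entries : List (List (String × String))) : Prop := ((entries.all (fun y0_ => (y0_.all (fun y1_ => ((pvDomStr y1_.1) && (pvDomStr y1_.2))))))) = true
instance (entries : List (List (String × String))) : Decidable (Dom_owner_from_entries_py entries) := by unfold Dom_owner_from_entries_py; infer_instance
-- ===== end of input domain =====

-- ===== PORT A =====
-- B changes A's two sequential scans into one pass with a fallback; same result (objective: simpler).
-- lookup in one entry (a Python dict modeled as an assoc list): entry.get(k)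
def pvGetA (e : List (String × String)) (k : String) : Option String :=
  (PySem.Dict.mk e).get? k

-- first loop of A: first entry with rel == "." and truthy uid and gid
def pvFindDot : List (List (String × String)) → Option (String × String)
  | [] => none
  | e :: rest =>
    if pvGetA e "rel" = some "." ∧ (pvGetA e "uid").getD "" ≠ "" ∧ (pvGetA e "gid").getD "" ≠ "" then
      some ((pvGetA e "uid").getD "", (pvGetA e "gid").getD "")
    else pvFindDot rest

-- second loop of A: first entry with truthy uid and gid
def pvFindValid : List (List (String × String)) → Option (String × String)
  | [] => none
  | e :: rest =>
    if (pvGetA e "uid").getD "" ≠ "" ∧ (pvGetA e "gid").getD "" ≠ "" then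
      some ((pvGetA e "uid").getD "", (pvGetA e "gid").getD "")
    else pvFindValid rest

def owner_from_entries_py (entries : List (List (String × String))) : Option (String × String) :=
  match pvFindDot entries with
  | some p => some p
  | none => pvFindValid entries

-- ===== PORT B =====
-- one pass; fb is the 'fallback' variable
def pvLoopB : List (List (String × String)) → Option (String × String) → Option (String × String)
  | [], fb => fb
  | e :: rest, fb =>
    let uid := (pvGetA e "uid").getD ""
    let gid := (pvGetA e "gid").getD ""
    if uid ≠ "" ∧ gid ≠ "" then
      if pvGetA e "rel" = some "." then some (uid, gid)
      else pvLoopB rest (if fb = none then some (uid, gid) else fb)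
    else pvLoopB rest fb

def owner_from_entries_py_alt (entries : List (List (String × String))) : Option (String × String) :=
  pvLoopB entries none

-- ===== PRECONDITION & SPEC =====
-- Pre_ only requires that in each entry the keys A looks up — "rel", "uid", "gid" — occur at most once: each
-- entry stands for a Python dict (unique keys), and on duplicate-key encodings first-match lookup is an encoding
-- artefact; A is total and both ports still agree there.
def Pre_owner_from_entries_py (entries : List (List (String × String))) : Prop :=
  ∀ e ∈ entries, (e.map Prod.fst).count "rel" ≤ 1 ∧ (e.map Prod.fst).count "uid" ≤ 1 ∧ (e.map Prod.fst).count "gid" ≤ 1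
instance (entries : List (List (String × String))) : Decidable (Pre_owner_from_entries_py entries) := by unfold Pre_owner_from_entries_py; infer_instance
def pvWitness_owner_from_entries_py : (List (List (String × String))) :=
  [[("rel", "."), ("uid", "1000"), ("gid", "1000")], [("uid", "0"), ("gid", "0")]]

def Spec_owner_from_entries_py (entries : List (List (String × String))) (out : Option (String × String)) : Prop := out = owner_from_entries_py_alt entries
instance (entries : List (List (String × String))) (out : Option (String × String)) : Decidable (Spec_owner_from_entries_py entries out) := by unfold Spec_owner_from_entries_py; infer_instance

-- ===== CLAIM (what is proved, stated in full; the proofs are below) =====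
def Claim_equal_owner_from_entries_py : Prop := ∀ (entries : List (List (String × String))), Dom_owner_from_entries_py entries → Pre_owner_from_entries_py entries → Spec_owner_from_entries_py entries (owner_from_entries_py entries)

-- ===== LEMMAS AND PROOFS =====
-- invariant of B's single pass: it returns the first '.'-match if any, else the fallback, else A's second scan
theorem pvLoopB_eq (l : List (List (String × String))) (fb : Option (String × String)) :
    pvLoopB l fb = match pvFindDot l with
      | some p => some p
      | none => match fb with
        | some x => some x
        | none => pvFindValid l := by
  induction l generalizing fb with
  | nil => cases fb <;> simp [pvLoopB, pvFindDot, pvFindValid]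
  | cons e rest ih =>
    by_cases hv : (pvGetA e "uid").getD "" ≠ "" ∧ (pvGetA e "gid").getD "" ≠ ""
    · by_cases hr : pvGetA e "rel" = some "."
      · simp [pvLoopB, pvFindDot, hv, hr]
      · rw [show pvLoopB (e :: rest) fb =
            pvLoopB rest (if fb = none then some ((pvGetA e "uid").getD "", (pvGetA e "gid").getD "") else fb) by
          simp [pvLoopB, hv, hr]]
        rw [ih]
        cases fb <;> simp [pvFindDot, pvFindValid, hr, hv]
    · rw [show pvLoopB (e :: rest) fb = pvLoopB rest fb by simp [pvLoopB, hv]]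
      rw [ih]
      simp [pvFindDot, pvFindValid, hv]


-- ===== VERDICT (by name: the statement is the Claim_ definition above) =====
theorem owner_from_entries_py_spec : Claim_equal_owner_from_entries_py := by
  intro entries _ _
  unfold Spec_owner_from_entries_py owner_from_entries_py owner_from_entries_py_alt
  rw [pvLoopB_eq]
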